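-- pv_equiv track=rewrite | github.com/pypi-data/pypi-mirror-112 | packages/ElexonDataPortal/ElexonDataPortal-2.0.10.tar.gz/ElexonDataPortal-2.0.10/ElexonDataPortal/dev/clientprep.py | construct_method_to_params_map
-- ===== SOURCE A (Python) =====
-- def construct_method_to_params_map(method_to_params):
--     standardised_params_map = {
--         'start_time': ['StartTime'],
--         'end_time': ['EndTime'],
--         'start_date': ['StartDate', 'FromSettlementDate', 'FromDate'],
--         'end_date': ['EndDate', 'ToSettlementDate', 'ToDate'],
--         'date': ['SettlementDate', 'ImplementationDate', 'DecommissioningDate', 'Date', 'startTimeOfHalfHrPeriod'],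
--         'SP': ['SettlementPeriod', 'Period', 'settlementPeriod'],
--         'year': ['Year'],
--         'month': ['Month', 'MonthName'],
--         'week': ['Week']
--     }
--
--     method_to_params_map = dict()
--
--     for method, params in method_to_params.items():
--         method_to_params_map[method] = dict()
--
--         for param in params.keys():
--             for standardised_param, bmrs_params in standardised_params_map.items():
--                 if param in bmrs_params:
--                     method_to_params_map[method][standardised_param] = param
--
--     return method_to_params_map
-- ===== SOURCE B (Python) =====
-- _STANDARDISED_PARAMS_MAP = {
--     'start_time': ['StartTime'],
--     'end_time': ['EndTime'],
--     'start_date': ['StartDate', 'FromSettlementDate', 'FromDate'],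
--     'end_date': ['EndDate', 'ToSettlementDate', 'ToDate'],
--     'date': ['SettlementDate', 'ImplementationDate', 'DecommissioningDate', 'Date', 'startTimeOfHalfHrPeriod'],
--     'SP': ['SettlementPeriod', 'Period', 'settlementPeriod'],
--     'year': ['Year'],
--     'month': ['Month', 'MonthName'],
--     'week': ['Week']
-- }
--
-- # One flat reverse-lookup table, built once: bmrs param name -> standardised name.
-- _REVERSE = {bmrs: std for std, bs in _STANDARDISED_PARAMS_MAP.items() for bmrs in bs}
--
--
-- def construct_method_to_params_map(method_to_params):
--     return {
--         method: {_REVERSE[p]: p for p in params if p in _REVERSE}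
--         for method, params in method_to_params.items()
--     }
-- ===== Notes on version B (the rewrite author's own statement) =====
-- stated objective: simpler
-- what changed: B flattens the constant standardised-params map once into a reverse lookup table (bmrs name -> standardised name) and builds the result with dict comprehensions doing one lookup per param, instead of A's nested scan over all 9 map entries for every param.
import Mathlib
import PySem

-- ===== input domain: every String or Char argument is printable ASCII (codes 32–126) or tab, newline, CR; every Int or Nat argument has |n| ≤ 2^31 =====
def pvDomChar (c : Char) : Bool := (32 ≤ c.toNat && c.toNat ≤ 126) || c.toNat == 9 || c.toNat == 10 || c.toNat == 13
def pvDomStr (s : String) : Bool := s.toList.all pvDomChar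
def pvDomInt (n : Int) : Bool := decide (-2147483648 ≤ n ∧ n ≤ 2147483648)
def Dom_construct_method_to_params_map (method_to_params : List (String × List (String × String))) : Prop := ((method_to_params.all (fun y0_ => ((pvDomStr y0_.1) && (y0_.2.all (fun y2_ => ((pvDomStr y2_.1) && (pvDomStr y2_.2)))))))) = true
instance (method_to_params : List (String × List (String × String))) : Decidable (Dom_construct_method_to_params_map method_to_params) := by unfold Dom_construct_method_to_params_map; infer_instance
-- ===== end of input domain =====

-- B replaces A's nested scan over the standardised-params map by a single flat
-- reverse-lookup table (bmrs name -> standardised name) consulted once per param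
-- (objective: simpler; equivalence of the return value is proved below).

-- ===== PORT A =====
-- the constant standardised_params_map of A, in its literal order
def stdParamsMap : List (String × List String) := [("start_time", ["StartTime"]),
  ("end_time", ["EndTime"]),
  ("start_date", ["StartDate", "FromSettlementDate", "FromDate"]),
  ("end_date", ["EndDate", "ToSettlementDate", "ToDate"]),
  ("date", ["SettlementDate", "ImplementationDate", "DecommissioningDate", "Date", "startTimeOfHalfHrPeriod"]),
  ("SP", ["SettlementPeriod", "Period", "settlementPeriod"]),
  ("year", ["Year"]),
  ("month", ["Month", "MonthName"]),
  ("week", ["Week"])]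

def construct_method_to_params_map (method_to_params : List (String × List (String × String))) : List (String × List (String × String)) :=
  (method_to_params.foldl
    (fun m mp =>
      m.insert mp.1
        (mp.2.foldl
          (fun d pr =>
            stdParamsMap.foldl
              (fun d sp => if pr.1 ∈ sp.2 then d.insert sp.1 pr.1 else d) d)
          PySem.Dict.empty))
    PySem.Dict.empty).items.map (fun me => (me.1, me.2.items))

-- ===== PORT B =====
-- B's module-level _REVERSE dict, flattened from _STANDARDISED_PARAMS_MAP in its iteration order
def reverseMap : PySem.Dict String String := PySem.Dict.ofList [("StartTime", "start_time"),
  ("EndTime", "end_time"),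
  ("StartDate", "start_date"),
  ("FromSettlementDate", "start_date"),
  ("FromDate", "start_date"),
  ("EndDate", "end_date"),
  ("ToSettlementDate", "end_date"),
  ("ToDate", "end_date"),
  ("SettlementDate", "date"),
  ("ImplementationDate", "date"),
  ("DecommissioningDate", "date"),
  ("Date", "date"),
  ("startTimeOfHalfHrPeriod", "date"),
  ("SettlementPeriod", "SP"),
  ("Period", "SP"),
  ("settlementPeriod", "SP"),
  ("Year", "year"),
  ("Month", "month"),
  ("MonthName", "month"),
  ("Week", "week")]

def construct_method_to_params_map_alt (method_to_params : List (String × List (String × String))) : List (String × List (String × String)) :=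
  (method_to_params.foldl
    (fun m mp =>
      m.insert mp.1
        (mp.2.foldl
          (fun d pr =>
            match reverseMap.get? pr.1 with
            | some s => d.insert s pr.1
            | none => d)
          PySem.Dict.empty))
    PySem.Dict.empty).items.map (fun me => (me.1, me.2.items))

-- ===== PRECONDITION & SPEC =====
def Spec_construct_method_to_params_map (method_to_params : List (String × List (String × String))) (out : List (String × List (String × String))) : Prop := out = construct_method_to_params_map_alt method_to_params
instance (method_to_params : List (String × List (String × String))) (out : List (String × List (String × String))) : Decidable (Spec_construct_method_to_params_map method_to_params out) := by unfold Spec_construct_method_to_params_map; infer_instance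

-- ===== CLAIM (what is proved, stated in full; the proofs are below) =====
def Claim_equal_construct_method_to_params_map : Prop := ∀ (method_to_params : List (String × List (String × String))), Dom_construct_method_to_params_map method_to_params → Spec_construct_method_to_params_map method_to_params (construct_method_to_params_map method_to_params)

-- ===== LEMMAS AND PROOFS =====

-- For any one param name p, A's inner scan over the 9 entries of stdParamsMap does
-- exactly what B's single lookup in the flat reverseMap does.
theorem innerStep_eq (d : PySem.Dict String String) (p : String) :
    stdParamsMap.foldl (fun d sp => if p ∈ sp.2 then d.insert sp.1 p else d) d
      = (match reverseMap.get? p with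
         | some s => d.insert s p
         | none => d) := by
  by_cases h0 : p = "StartTime"
  · subst h0; rfl
  by_cases h1 : p = "EndTime"
  · subst h1; rfl
  by_cases h2 : p = "StartDate"
  · subst h2; rfl
  by_cases h3 : p = "FromSettlementDate"
  · subst h3; rfl
  by_cases h4 : p = "FromDate"
  · subst h4; rfl
  by_cases h5 : p = "EndDate"
  · subst h5; rfl
  by_cases h6 : p = "ToSettlementDate"
  · subst h6; rfl
  by_cases h7 : p = "ToDate"
  · subst h7; rfl
  by_cases h8 : p = "SettlementDate"
  · subst h8; rfl
  by_cases h9 : p = "ImplementationDate"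
  · subst h9; rfl
  by_cases h10 : p = "DecommissioningDate"
  · subst h10; rfl
  by_cases h11 : p = "Date"
  · subst h11; rfl
  by_cases h12 : p = "startTimeOfHalfHrPeriod"
  · subst h12; rfl
  by_cases h13 : p = "SettlementPeriod"
  · subst h13; rfl
  by_cases h14 : p = "Period"
  · subst h14; rfl
  by_cases h15 : p = "settlementPeriod"
  · subst h15; rfl
  by_cases h16 : p = "Year"
  · subst h16; rfl
  by_cases h17 : p = "Month"
  · subst h17; rfl
  by_cases h18 : p = "MonthName"
  · subst h18; rfl
  by_cases h19 : p = "Week"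
  · subst h19; rfl
  have hmk : reverseMap = PySem.Dict.mk [("StartTime", "start_time"),
  ("EndTime", "end_time"),
  ("StartDate", "start_date"),
  ("FromSettlementDate", "start_date"),
  ("FromDate", "start_date"),
  ("EndDate", "end_date"),
  ("ToSettlementDate", "end_date"),
  ("ToDate", "end_date"),
  ("SettlementDate", "date"),
  ("ImplementationDate", "date"),
  ("DecommissioningDate", "date"),
  ("Date", "date"),
  ("startTimeOfHalfHrPeriod", "date"),
  ("SettlementPeriod", "SP"),
  ("Period", "SP"),
  ("settlementPeriod", "SP"),
  ("Year", "year"),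
  ("Month", "month"),
  ("MonthName", "month"),
  ("Week", "week")] := by decide
  simp [stdParamsMap, hmk, PySem.Dict.get?, h0, h1, h2, h3, h4, h5, h6, h7, h8, h9, h10, h11, h12, h13, h14, h15, h16, h17, h18, h19, Ne.symm h0, Ne.symm h1, Ne.symm h2, Ne.symm h3, Ne.symm h4, Ne.symm h5, Ne.symm h6, Ne.symm h7, Ne.symm h8, Ne.symm h9, Ne.symm h10, Ne.symm h11, Ne.symm h12, Ne.symm h13, Ne.symm h14, Ne.symm h15, Ne.symm h16, Ne.symm h17, Ne.symm h18, Ne.symm h19]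

-- ===== VERDICT (by name: the statement is the Claim_ definition above) =====
theorem construct_method_to_params_map_spec : Claim_equal_construct_method_to_params_map := by
  intro mtp _
  have hstep : (fun (d : PySem.Dict String String) (pr : String × String) =>
      stdParamsMap.foldl (fun d sp => if pr.1 ∈ sp.2 then d.insert sp.1 pr.1 else d) d)
    = (fun (d : PySem.Dict String String) (pr : String × String) =>
        match reverseMap.get? pr.1 with
        | some s => d.insert s pr.1
        | none => d) := by
    funext d pr; exact innerStep_eq d pr.1
  show construct_method_to_params_map mtp = construct_method_to_params_map_alt mtp
  unfold construct_method_to_params_map construct_method_to_params_map_alt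
  rw [hstep]
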